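-- pv_equiv track=rewrite | github.com/joshanashakya/dissertation | workspace/dataset/java-python/GeeksForGeeks/1204/A/2.py | countnumber
-- ===== SOURCE A (Python) =====
-- from math import sqrt
--
-- def primesieve(prime) :
--
--     # Sieve to store whether a
--     # number is prime or not in
--     # O(nlog(log(n)))
--     prime[1] = False;
--
--     for p in range(2, int(sqrt(650)) + 1) :
--         if (prime[p] == True) :
--             for i in range(p * 2, 651, p) :
--                 prime[i] = False;
--
-- def sum_sqsum(n) :
--
--     sum = 0;
--     sqsum = 0;
--
--     # Until number is not
--     # zero
--     while (n) :
--         x = n % 10;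
--         sum += x;
--         sqsum += x * x;
--         n //= 10;
--
--     return (sum, sqsum);
--
-- def countnumber(L, R):
--
--     prime = [True] * 651;
--
--     primesieve(prime);
--
--     cnt = 0;
--
--     # Iterate for each value
--     # in the range of L to R
--     for i in range(L, R + 1) :
--
--         # digit.first stores sum of digits
--         # digit.second stores sum of
--         # square of digit
--         digit = sum_sqsum(i);
--
--         # If sum of digits and sum of
--         # square of digit both are
--         # prime then increment the count
--         if (prime[digit[0]] and prime[digit[1]]) :
--             cnt += 1;
--
--     return cnt;
-- ===== SOURCE B (Python) =====
-- def _is_prime(n):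
--     if n < 2:
--         return False
--     k = 2
--     while k * k <= n:
--         if n % k == 0:
--             return False
--         k += 1
--     return True
--
--
-- def _digits(n):
--     ds = []
--     while n > 0:
--         ds.append(n % 10)
--         n //= 10
--     ds.reverse()
--     return ds if ds else [0]
--
--
-- def _count_upto(n):
--     # number of i in [0, n] whose digit sum and digit square-sum are both prime,
--     # by a forward digit DP over n's decimal digits
--     if n < 0:
--         return 0
--     free = {}          # (digit sum, digit square-sum) -> how many prefixes strictly below n's prefix
--     S = 0              # digit sum of n's processed prefix
--     Q = 0              # digit square-sum of n's processed prefix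
--     for d in _digits(n):
--         new = {}
--         for (s, q), c in free.items():
--             for x in range(10):
--                 k = (s + x, q + x * x)
--                 new[k] = new.get(k, 0) + c
--         for x in range(d):
--             k = (S + x, Q + x * x)
--             new[k] = new.get(k, 0) + 1
--         free = new
--         S += d
--         Q += d * d
--     total = 0
--     for (s, q), c in free.items():
--         if _is_prime(s) and _is_prime(q):
--             total += c
--     if _is_prime(S) and _is_prime(Q):
--         total += 1
--     return total
--
--
-- def countnumber(L, R):
--     if L > R:
--         return 0
--     return _count_upto(R) - _count_upto(L - 1)
-- ===== Notes on version B (the rewrite author's own statement) =====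
-- stated objective: faster
-- what changed: B replaces A's per-number scan of [L,R] (sieve table lookup for each i) by a digit DP: it counts good numbers in [0,R] and [0,L-1] with one forward pass over the decimal digits maintaining a dict from (digit-sum, digit-square-sum) to how many prefixes lie strictly below, and checks primality by trial division on the few final states.
-- intended difference: On ranges containing 0 (L = 0 <= R) A counts 0 as good because slot 0 of its sieve table is never cleared, returning one more than B; 0's digit sum 0 is not prime, so B's count is the intended one. — e.g. on countnumber(0, 0): A returns 1, B returns 0
-- outside the precondition, e.g. on countnumber(100000000, 100000000): A returns 0, B returns 0
import Mathlib
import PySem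

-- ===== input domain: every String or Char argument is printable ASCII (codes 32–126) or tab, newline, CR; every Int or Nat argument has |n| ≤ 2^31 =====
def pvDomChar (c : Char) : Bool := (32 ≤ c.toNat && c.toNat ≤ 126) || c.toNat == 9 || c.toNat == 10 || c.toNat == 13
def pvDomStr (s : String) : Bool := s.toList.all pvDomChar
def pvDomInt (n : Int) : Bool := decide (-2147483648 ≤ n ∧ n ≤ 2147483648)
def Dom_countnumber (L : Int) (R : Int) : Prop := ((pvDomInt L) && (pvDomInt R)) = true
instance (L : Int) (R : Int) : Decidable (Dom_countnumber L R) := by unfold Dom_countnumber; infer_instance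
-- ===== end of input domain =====

-- B replaces A's per-number scan of [L, R] by a digit DP over the decimal digits (objective: faster);
-- A's count of 0 itself (ranges with L = 0) is an artefact of its sieve table and is stated as the intended difference D_ below.

-- ===== PORT A =====

-- primesieve: prime[1] = False and prime[i] = False are Python list assignments;
-- PySem.List.pySetD is exact for the in-range indices used here. int(sqrt(650)) + 1 = 26.
def primesieve (prime : List Bool) : List Bool :=
  let prime := PySem.List.pySetD prime 1 false
  (PySem.List.pyRange 2 26 1).foldl (fun pr p =>
    if PySem.List.pyGetD pr p false == true then
      (PySem.List.pyRange (p * 2) 651 p).foldl (fun pr2 i => PySem.List.pySetD pr2 i false) pr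
    else pr) prime

-- sum_sqsum: 'while (n)' ported with fuel; for n ≥ 0 the loop makes at most n.natAbs steps
-- (n shrinks via n //= 10). For n < 0 Python diverges — those inputs are outside Pre_.
def sumSqsumGo : Nat → Int → Int → Int → Int × Int
  | 0, _, sum, sqsum => (sum, sqsum)
  | fuel+1, n, sum, sqsum =>
    if n ≠ 0 then
      let x := PySem.Int.mod n 10
      sumSqsumGo fuel (PySem.Int.floordiv n 10) (sum + x) (sqsum + x * x)
    else (sum, sqsum)

def sum_sqsum (n : Int) : Int × Int := sumSqsumGo (n.natAbs + 1) n 0 0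

-- prime[digit[0]] raises IndexError past index 650; Pre_ keeps both indices in range,
-- so the default of pyGetD is never used on claimed inputs.
def countnumber (L : Int) (R : Int) : Int :=
  let prime := List.replicate 651 true
  let prime := primesieve prime
  (PySem.List.pyRange L (R + 1) 1).foldl (fun cnt i =>
    let digit := sum_sqsum i
    if PySem.List.pyGetD prime digit.1 false && PySem.List.pyGetD prime digit.2 false then
      cnt + 1
    else cnt) 0

-- ===== PORT B =====

-- _is_prime: trial division 'while k * k <= n' ported with fuel; the loop makes < n.natAbs steps.
def isPrimeGo : Nat → Int → Int → Bool
  | 0, _, _ => true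
  | fuel+1, n, k =>
    if k * k ≤ n then
      (if PySem.Int.mod n k == 0 then false else isPrimeGo fuel n (k + 1))
    else true

def isPrime (n : Int) : Bool := if n < 2 then false else isPrimeGo (n.natAbs + 1) n 2

-- _digits: 'while n > 0' ported with fuel (at most n.natAbs steps, n //= 10 each time).
def digitsGo : Nat → Int → List Int → List Int
  | 0, _, ds => ds
  | fuel+1, n, ds =>
    if 0 < n then digitsGo fuel (PySem.Int.floordiv n 10) (ds ++ [PySem.Int.mod n 10])
    else ds

def pyDigits (n : Int) : List Int :=
  let ds := (digitsGo (n.natAbs + 1) n []).reverse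
  if ds = [] then [0] else ds

-- the body of _count_upto's 'for d in _digits(n)' loop
def dpStep (st : PySem.Dict (Int × Int) Int × Int × Int) (d : Int) :
    PySem.Dict (Int × Int) Int × Int × Int :=
  let free := st.1
  let S := st.2.1
  let Q := st.2.2
  let new := free.items.foldl (fun acc p =>
      (PySem.List.pyRange 0 10 1).foldl (fun acc2 x =>
        acc2.insert (p.1.1 + x, p.1.2 + x * x) (acc2.getD (p.1.1 + x, p.1.2 + x * x) 0 + p.2))
        acc)
    PySem.Dict.empty
  let new := (PySem.List.pyRange 0 d 1).foldl (fun acc x =>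
      acc.insert (S + x, Q + x * x) (acc.getD (S + x, Q + x * x) 0 + 1)) new
  (new, S + d, Q + d * d)

def countUpto (n : Int) : Int :=
  if n < 0 then 0
  else
    let st := (pyDigits n).foldl dpStep (PySem.Dict.empty, 0, 0)
    let total := st.1.items.foldl (fun t p =>
      if isPrime p.1.1 && isPrime p.1.2 then t + p.2 else t) 0
    if isPrime st.2.1 && isPrime st.2.2 then total + 1 else total

def countnumber_alt (L : Int) (R : Int) : Int :=
  if L > R then 0 else countUpto R - countUpto (L - 1)

-- ===== PRECONDITION & SPEC =====

-- Pre_ excludes (a) nonempty ranges starting below 0, where A's digit loop never terminates, and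
-- (b) conservatively, nonempty ranges reaching past 99999999: past 8 digits a digit-square-sum can
-- exceed 650 and index A's table out of range (IndexError); a few larger ranges that happen to
-- avoid every such number (and on which A returns) are excluded with them.
def Pre_countnumber (L : Int) (R : Int) : Prop := R < L ∨ (0 ≤ L ∧ R ≤ 99999999)
instance (L : Int) (R : Int) : Decidable (Pre_countnumber L R) := by
  unfold Pre_countnumber; infer_instance

def pvWitness_countnumber : Int × Int := (1, 120)

-- On ranges containing 0 (L = 0 ≤ R) A counts 0 as good because slot 0 of its sieve table is never
-- cleared, returning one more than B; 0's digit sum 0 is not prime, so B's count is the intended one.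
def D_countnumber (L : Int) (R : Int) : Prop := L = 0 ∧ 0 ≤ R
instance (L : Int) (R : Int) : Decidable (D_countnumber L R) := by
  unfold D_countnumber; infer_instance

def Spec_countnumber (L : Int) (R : Int) (out : Int) : Prop :=
  ¬ D_countnumber L R → out = countnumber_alt L R
instance (L : Int) (R : Int) (out : Int) : Decidable (Spec_countnumber L R out) := by
  unfold Spec_countnumber; infer_instance

def pvDiffWitness_countnumber : Int × Int := (0, 0)
def pvDiffWitnessOut_countnumber : Int × Int := (1, 0)

-- ===== CLAIM (what is proved, stated in full; the proofs are below) =====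
def Claim_unchanged_countnumber : Prop := ∀ (L : Int) (R : Int), Dom_countnumber L R →
  Pre_countnumber L R → Spec_countnumber L R (countnumber L R)
def Claim_changed_countnumber : Prop :=
  Dom_countnumber (pvDiffWitness_countnumber.1) (pvDiffWitness_countnumber.2) ∧
  Pre_countnumber (pvDiffWitness_countnumber.1) (pvDiffWitness_countnumber.2) ∧
  D_countnumber (pvDiffWitness_countnumber.1) (pvDiffWitness_countnumber.2) ∧
  countnumber (pvDiffWitness_countnumber.1) (pvDiffWitness_countnumber.2) = pvDiffWitnessOut_countnumber.1 ∧
  countnumber_alt (pvDiffWitness_countnumber.1) (pvDiffWitness_countnumber.2) = pvDiffWitnessOut_countnumber.2 ∧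
  pvDiffWitnessOut_countnumber.1 ≠ pvDiffWitnessOut_countnumber.2
def Claim_exact_countnumber : Prop := ∀ (L : Int) (R : Int), Dom_countnumber L R →
  Pre_countnumber L R → D_countnumber L R → countnumber L R ≠ countnumber_alt L R

-- ===== LEMMAS AND PROOFS =====

-- digit sum and digit square-sum of a natural number (specification layer)
def dsN (n : Nat) : Nat :=
  if h : n = 0 then 0 else n % 10 + dsN (n / 10)
decreasing_by exact Nat.div_lt_self (Nat.pos_of_ne_zero h) (by norm_num)

def dqN (n : Nat) : Nat :=
  if h : n = 0 then 0 else (n % 10) * (n % 10) + dqN (n / 10)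
decreasing_by exact Nat.div_lt_self (Nat.pos_of_ne_zero h) (by norm_num)

theorem dsN_zero : dsN 0 = 0 := by rw [dsN]; rfl
theorem dqN_zero : dqN 0 = 0 := by rw [dqN]; rfl
theorem dsN_step (j x : Nat) (hx : x < 10) : dsN (10 * j + x) = dsN j + x := by
  by_cases h : 10 * j + x = 0
  · have hj : j = 0 := by omega
    have hx0 : x = 0 := by omega
    subst hj; subst hx0; simp [dsN_zero]
  · rw [dsN]
    have hm : (10 * j + x) % 10 = x := by omega
    have hd : (10 * j + x) / 10 = j := by omega
    simp only [h, dite_false, hm, hd]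
    omega
theorem dqN_step (j x : Nat) (hx : x < 10) : dqN (10 * j + x) = dqN j + x * x := by
  by_cases h : 10 * j + x = 0
  · have hj : j = 0 := by omega
    have hx0 : x = 0 := by omega
    subst hj; subst hx0; simp [dqN_zero]
  · rw [dqN]
    have hm : (10 * j + x) % 10 = x := by omega
    have hd : (10 * j + x) / 10 = j := by omega
    simp only [h, dite_false, hm, hd]
    omega
theorem dsN_pos (n : Nat) (h : 0 < n) : 0 < dsN n := by
  induction n using Nat.strong_induction_on with
  | _ n ih =>
    rw [dsN]
    have hn : ¬ n = 0 := by omega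
    simp only [hn, dite_false]
    rcases Nat.eq_zero_or_pos (n % 10) with h0 | h0
    · have hq : 0 < n / 10 := by omega
      have := ih (n / 10) (Nat.div_lt_self h (by norm_num)) hq
      omega
    · omega
theorem dqN_pos (n : Nat) (h : 0 < n) : 0 < dqN n := by
  induction n using Nat.strong_induction_on with
  | _ n ih =>
    rw [dqN]
    have hn : ¬ n = 0 := by omega
    simp only [hn, dite_false]
    rcases Nat.eq_zero_or_pos (n % 10) with h0 | h0
    · have hq : 0 < n / 10 := by omega
      have := ih (n / 10) (Nat.div_lt_self h (by norm_num)) hq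
      omega
    · nlinarith [Nat.le_refl 0]
theorem ds_dq_bound (k : Nat) : ∀ n, n < 10 ^ k → dsN n ≤ 9 * k ∧ dqN n ≤ 81 * k := by
  induction k with
  | zero => intro n hn; interval_cases n; simp [dsN_zero, dqN_zero]
  | succ k ih =>
    intro n hn
    by_cases h : n = 0
    · subst h; simp [dsN_zero, dqN_zero]
    · rw [dsN, dqN]
      simp only [h, dite_false]
      have hp : (10:Nat) ^ (k+1) = 10 ^ k * 10 := pow_succ 10 k
      have hq : n / 10 < 10 ^ k := by rw [hp] at hn; omega
      have := ih (n / 10) hq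
      have hm : n % 10 ≤ 9 := by omega
      have hmm : n % 10 * (n % 10) ≤ 81 := Nat.le_trans (Nat.mul_le_mul hm hm) (by norm_num)
      omega
theorem sumSqsumGo_spec (fuel : Nat) : ∀ (m : Nat) (sum sq : Int), m ≤ fuel →
    sumSqsumGo fuel (m : Int) sum sq = (sum + (dsN m : Int), sq + (dqN m : Int)) := by
  induction fuel with
  | zero =>
    intro m sum sq hm
    have : m = 0 := by omega
    subst this
    simp [sumSqsumGo, dsN_zero, dqN_zero]
  | succ fuel ih =>
    intro m sum sq hm
    by_cases h : m = 0
    · subst h; simp [sumSqsumGo, dsN_zero, dqN_zero]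
    · have hne : ((m : Int)) ≠ 0 := by exact_mod_cast h
      simp only [sumSqsumGo, hne, ne_eq, not_false_iff, if_true]
      have hmod : PySem.Int.mod (m : Int) 10 = ((m % 10 : Nat) : Int) := by
        exact_mod_cast PySem.Int.mod_natCast m 10
      have hdiv : PySem.Int.floordiv (m : Int) 10 = ((m / 10 : Nat) : Int) := by
        exact_mod_cast PySem.Int.floordiv_natCast m 10
      rw [hmod, hdiv, ih (m / 10) _ _ (by omega)]
      conv_rhs => rw [dsN, dqN]
      simp only [h, dite_false]
      refine Prod.ext ?_ ?_ <;> push_cast <;> ring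
theorem sum_sqsum_natCast (m : Nat) : sum_sqsum (m : Int) = ((dsN m : Int), (dqN m : Int)) := by
  unfold sum_sqsum
  rw [sumSqsumGo_spec _ m 0 0 (by rw [Int.natAbs_natCast]; omega)]
  simp
set_option maxRecDepth 100000 in
set_option maxHeartbeats 4000000 in
theorem table_eq : primesieve (List.replicate 651 true)
    = (List.range 651).map (fun (s : Nat) => if s = 0 then true else isPrime (s : Int)) := by decide

set_option maxRecDepth 10000 in
theorem table_lookup (s : Nat) (hs : s < 651) :
    PySem.List.pyGetD (primesieve (List.replicate 651 true)) (s : Int) false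
      = if s = 0 then true else isPrime (s : Int) := by
  rw [table_eq]
  rw [PySem.List.pyGetD_natCast]
  exact PySem.List.getD_map_range _ 651 s false hs

def chkB (j : Nat) : Bool := isPrime ((dsN j : Nat) : Int) && isPrime ((dqN j : Nat) : Int)
def indN (j : Nat) : Int := if chkB j then 1 else 0
def G (m : Nat) : Int := ((List.range m).map indN).sum

theorem indN_zero : indN 0 = 0 := by
  simp [indN, chkB, dsN_zero, dqN_zero, isPrime]

theorem Atest_eq (j : Nat) (h1 : 0 < j) (h8 : j < 100000000) :
    (PySem.List.pyGetD (primesieve (List.replicate 651 true)) (sum_sqsum (j : Int)).1 false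
      && PySem.List.pyGetD (primesieve (List.replicate 651 true)) (sum_sqsum (j : Int)).2 false)
    = chkB j := by
  have hb := ds_dq_bound 8 j (by norm_num at h8 ⊢; omega)
  rw [sum_sqsum_natCast]
  simp only
  rw [table_lookup (dsN j) (by omega), table_lookup (dqN j) (by omega)]
  have hs := dsN_pos j h1
  have hq := dqN_pos j h1
  rw [if_neg (by omega), if_neg (by omega)]
  rfl

theorem Atest_zero :
    (PySem.List.pyGetD (primesieve (List.replicate 651 true)) (sum_sqsum (0 : Int)).1 false
      && PySem.List.pyGetD (primesieve (List.replicate 651 true)) (sum_sqsum (0 : Int)).2 false)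
    = true := by
  have h0 : sum_sqsum (0 : Int) = (0, 0) := by
    have := sum_sqsum_natCast 0
    simpa [dsN_zero, dqN_zero] using this
  have h : PySem.List.pyGetD (primesieve (List.replicate 651 true)) (0 : Int) false = true := by
    have h2 := table_lookup 0 (by norm_num)
    rw [if_pos rfl] at h2
    exact_mod_cast h2
  rw [h0]
  show (PySem.List.pyGetD (primesieve (List.replicate 651 true)) 0 false
    && PySem.List.pyGetD (primesieve (List.replicate 651 true)) 0 false) = true
  rw [h]
  rfl
theorem zsum (a : Nat) : ∀ n : Nat, 0 < n →
    ((List.range n).map (fun k => if a + k = 0 then (1:Int) else 0)).sum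
      = if a = 0 then 1 else 0 := by
  intro n
  induction n with
  | zero => omega
  | succ m ih =>
    intro _
    rcases Nat.eq_zero_or_pos m with hm | hm
    · subst hm
      simp [List.range_one]
    · rw [List.range_succ, List.map_append, List.sum_append, ih hm]
      have h2 : ¬ (a + m = 0) := by omega
      simp only [List.map_cons, List.map_nil, List.sum_cons, List.sum_nil, if_neg h2]
      ring

theorem countA_eq (a b : Nat) (hab : a ≤ b) (hb : b < 100000000) :
    countnumber (a : Int) (b : Int) = (if a = 0 then 1 else 0) + (G (b + 1) - G a) := by
  have hrange : PySem.List.pyRange (a : Int) ((b : Int) + 1)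
      = List.map (fun k : Nat => ((a : Int) + (k : Int))) (List.range (b + 1 - a)) := by
    rw [PySem.List.pyRange_one]
    congr 2
    omega
  simp only [countnumber]
  rw [hrange, List.foldl_map, PySem.List.foldl_if_add_one, ← PySem.List.sum_map_ite_one_zero]
  have hcong : ∀ k ∈ List.range (b + 1 - a),
      (if (PySem.List.pyGetD (primesieve (List.replicate 651 true)) (sum_sqsum ((a:Int) + (k:Int))).1 false
          && PySem.List.pyGetD (primesieve (List.replicate 651 true)) (sum_sqsum ((a:Int) + (k:Int))).2 false)
        then (1:Int) else 0)
      = indN (a + k) + (if a + k = 0 then (1:Int) else 0) := by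
    intro k hk
    have hk' := List.mem_range.mp hk
    by_cases h0 : a + k = 0
    · have haz : a = 0 := by omega
      have hkz : k = 0 := by omega
      subst haz; subst hkz
      rw [show ((0:Nat):Int) + ((0:Nat):Int) = (0:Int) by norm_num, Atest_zero]
      simp [indN_zero]
    · have hc : ((a + k : Nat) : Int) = (a:Int) + (k:Int) := by push_cast; ring
      rw [← hc, Atest_eq (a + k) (by omega) (by omega), if_neg h0, add_zero]
      rfl
  rw [List.map_congr_left hcong, PySem.List.sum_map_add_int, zsum a (b + 1 - a) (by omega)]
  have hG : G (b + 1) = G a + ((List.range (b + 1 - a)).map (fun k => indN (a + k))).sum := by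
    unfold G
    rw [show b + 1 = a + (b + 1 - a) by omega, List.range_add, List.map_append, List.sum_append,
      List.map_map]
    simp [Function.comp_def]
  omega
def recN (n : Nat) : List Nat :=
  if h : n = 0 then [] else n % 10 :: recN (n / 10)
decreasing_by exact Nat.div_lt_self (Nat.pos_of_ne_zero h) (by norm_num)

def digN (m : Nat) : List Nat := if m = 0 then [0] else (recN m).reverse

theorem recN_lt (n : Nat) : ∀ d ∈ recN n, d < 10 := by
  induction n using Nat.strong_induction_on with
  | _ n ih =>
    rw [recN]
    by_cases h : n = 0
    · simp [h]
    · simp only [h, dite_false, List.mem_cons]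
      rintro d (rfl | hd)
      · omega
      · exact ih (n / 10) (Nat.div_lt_self (by omega) (by norm_num)) d hd

theorem digitsGo_spec (fuel : Nat) : ∀ (m : Nat) (acc : List Int), m ≤ fuel →
    digitsGo fuel (m : Int) acc = acc ++ (recN m).map (fun (d : Nat) => (d : Int)) := by
  induction fuel with
  | zero =>
    intro m acc hm
    have : m = 0 := by omega
    subst this
    rw [recN]
    simp [digitsGo]
  | succ fuel ih =>
    intro m acc hm
    by_cases h : m = 0
    · subst h
      rw [recN]
      simp [digitsGo]
    · have hpos : (0:Int) < (m:Int) := by exact_mod_cast Nat.pos_of_ne_zero h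
      simp only [digitsGo, hpos, if_true]
      have hmod : PySem.Int.mod (m : Int) 10 = ((m % 10 : Nat) : Int) := by
        exact_mod_cast PySem.Int.mod_natCast m 10
      have hdiv : PySem.Int.floordiv (m : Int) 10 = ((m / 10 : Nat) : Int) := by
        exact_mod_cast PySem.Int.floordiv_natCast m 10
      rw [hmod, hdiv, ih (m / 10) _ (by omega)]
      conv_rhs => rw [recN]
      simp [h]

theorem pyDigits_natCast (m : Nat) : pyDigits (m : Int) = (digN m).map (fun (d : Nat) => (d : Int)) := by
  unfold pyDigits
  rw [digitsGo_spec _ m [] (by rw [Int.natAbs_natCast]; omega)]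
  simp only [List.nil_append]
  by_cases h : m = 0
  · subst h
    rw [recN]
    simp [digN]
  · have hne : (recN m).map (fun (d : Nat) => (d : Int)) ≠ [] := by
      rw [recN]
      simp [h]
    unfold digN
    rw [if_neg (by simpa using hne), if_neg h]
    exact List.map_reverse.symm

theorem digN_lt (m : Nat) : ∀ d ∈ digN m, d < 10 := by
  unfold digN
  by_cases h : m = 0
  · simp [h]
  · simp only [h, if_false]
    intro d hd
    exact recN_lt m d (List.mem_reverse.mp hd)

theorem recN_val (m : Nat) : ∀ a : Nat,
    (recN m).reverse.foldl (fun v d => 10 * v + d) a = a * 10 ^ (recN m).length + m := by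
  induction m using Nat.strong_induction_on with
  | _ m ih =>
    intro a
    by_cases h : m = 0
    · subst h
      rw [recN]
      simp
    · conv_lhs => rw [recN]
      conv_rhs => rw [recN]
      simp only [h, dite_false, List.reverse_cons, List.foldl_append, List.length_cons]
      rw [ih (m / 10) (Nat.div_lt_self (by omega) (by norm_num)) a]
      simp only [List.foldl_cons, List.foldl_nil]
      have : 10 ^ ((recN (m / 10)).length + 1) = 10 ^ (recN (m / 10)).length * 10 := pow_succ 10 _
      rw [this]
      ring_nf
      omega

theorem digN_val (m : Nat) : (digN m).foldl (fun v d => 10 * v + d) 0 = m := by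
  unfold digN
  by_cases h : m = 0
  · simp [h]
  · rw [if_neg h, recN_val m 0]
    simp
def Wsum (d : PySem.Dict (Int × Int) Int) (w : Int × Int → Int) : Int :=
  (d.items.map (fun p => w p.1 * p.2)).sum

theorem map_replace_id (t : List ((Int × Int) × Int)) (k : Int × Int) (v : Int)
    (h : ∀ p ∈ t, p.1 ≠ k) :
    t.map (fun p => if p.1 == k then (k, v) else p) = t := by
  have : ∀ p ∈ t, (fun p => if p.1 == k then (k, v) else p) p = id p := by
    intro p hp
    simp [h p hp]
  rw [List.map_congr_left this, List.map_id]

theorem sum_map_replace (l : List ((Int × Int) × Int)) (k : Int × Int) (v v0 : Int)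
    (w : Int × Int → Int) (hnd : (l.map Prod.fst).Nodup) (hmem : (k, v0) ∈ l) :
    ((l.map (fun p => if p.1 == k then (k, v) else p)).map (fun p => w p.1 * p.2)).sum
      = (l.map (fun p => w p.1 * p.2)).sum - w k * v0 + w k * v := by
  induction l with
  | nil => simp at hmem
  | cons p t ih =>
    rw [List.map_cons] at hnd
    have hnd' := hnd
    rw [List.nodup_cons] at hnd'
    obtain ⟨hph, hpt⟩ := hnd'
    by_cases hpk : p.1 = k
    · have hp : p = (k, v0) := by
        rcases List.mem_cons.mp hmem with h | h
        · exact h.symm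
        · exfalso
          refine hph ?_
          rw [hpk]
          exact List.mem_map_of_mem h
      have htid : t.map (fun p => if p.1 == k then (k, v) else p) = t := by
        apply map_replace_id
        intro q hq hqk
        refine hph ?_
        rw [hpk, ← hqk]
        exact List.mem_map_of_mem hq
      simp only [List.map_cons, hpk, beq_self_eq_true, if_true, htid, List.sum_cons]
      rw [hp]
      ring
    · have hmem' : (k, v0) ∈ t := by
        rcases List.mem_cons.mp hmem with h | h
        · exfalso; exact hpk (by rw [← h])
        · exact h
      simp only [List.map_cons, List.sum_cons]
      rw [if_neg (by simpa using hpk), ih hpt hmem']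
      ring
theorem wsum_bump (d : PySem.Dict (Int × Int) Int) (k : Int × Int) (c : Int)
    (w : Int × Int → Int) (hnd : d.keys.Nodup) :
    Wsum (d.insert k (d.getD k 0 + c)) w = Wsum d w + w k * c := by
  cases hc : d.contains k
  · have h0 : d.getD k 0 = 0 := PySem.Dict.getD_of_not_contains _ _ hc
    rw [Wsum, PySem.Dict.items_insert_of_not_contains _ _ hc, h0]
    rw [List.map_append, List.sum_append]
    simp [Wsum]
  · have hsome : (d.get? k).isSome := by
      rw [← PySem.Dict.contains_eq_isSome_get? d k, hc]
    obtain ⟨v0, hv0⟩ := Option.isSome_iff_exists.mp hsome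
    have hmem : (k, v0) ∈ d.items := PySem.Dict.mem_items_of_get?_eq_some _ hv0
    have hgetD : d.getD k 0 = v0 := PySem.Dict.getD_of_mem_items _ hmem hnd 0
    have hndk : (d.items.map Prod.fst).Nodup := hnd
    rw [Wsum, PySem.Dict.items_insert_of_contains _ _ hc,
      sum_map_replace d.items k (d.getD k 0 + c) v0 w hndk hmem, hgetD, Wsum]
    ring

theorem wsum_foldl_bump {β : Type} (l : List β) (kf : β → Int × Int) (af : β → Int) :
    ∀ (d : PySem.Dict (Int × Int) Int), d.keys.Nodup →
    (l.foldl (fun acc b => acc.insert (kf b) (acc.getD (kf b) 0 + af b)) d).keys.Nodup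
    ∧ ∀ w, Wsum (l.foldl (fun acc b => acc.insert (kf b) (acc.getD (kf b) 0 + af b)) d) w
        = Wsum d w + (l.map (fun b => w (kf b) * af b)).sum := by
  induction l with
  | nil => intro d hnd; exact ⟨hnd, fun w => by simp⟩
  | cons b t ih =>
    intro d hnd
    have hnd' : (d.insert (kf b) (d.getD (kf b) 0 + af b)).keys.Nodup :=
      PySem.Dict.nodup_keys_insert _ _ _ hnd
    obtain ⟨h1, h2⟩ := ih (d.insert (kf b) (d.getD (kf b) 0 + af b)) hnd'
    refine ⟨h1, fun w => ?_⟩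
    rw [List.foldl_cons, h2 w, wsum_bump d (kf b) (af b) w hnd]
    simp only [List.map_cons, List.sum_cons]
    ring

def shiftW (w : Int × Int → Int) (k : Int × Int) : Int :=
  ((PySem.List.pyRange 0 10 1).map (fun x => w (k.1 + x, k.2 + x * x))).sum

set_option maxHeartbeats 1000000 in
theorem wsum_outer (its : List ((Int × Int) × Int)) :
    ∀ (d : PySem.Dict (Int × Int) Int), d.keys.Nodup →
    (its.foldl (fun acc p =>
        (PySem.List.pyRange 0 10 1).foldl (fun acc2 x =>
          acc2.insert (p.1.1 + x, p.1.2 + x * x) (acc2.getD (p.1.1 + x, p.1.2 + x * x) 0 + p.2))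
          acc) d).keys.Nodup
    ∧ ∀ w, Wsum (its.foldl (fun acc p =>
        (PySem.List.pyRange 0 10 1).foldl (fun acc2 x =>
          acc2.insert (p.1.1 + x, p.1.2 + x * x) (acc2.getD (p.1.1 + x, p.1.2 + x * x) 0 + p.2))
          acc) d) w
        = Wsum d w + (its.map (fun p => shiftW w p.1 * p.2)).sum := by
  induction its with
  | nil => intro d hnd; exact ⟨hnd, fun w => by simp⟩
  | cons p t ih =>
    intro d hnd
    obtain ⟨g1, g2⟩ := wsum_foldl_bump (PySem.List.pyRange 0 10 1)
      (fun x => (p.1.1 + x, p.1.2 + x * x)) (fun _ => p.2) d hnd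
    simp only [List.foldl_cons]
    generalize hD : ((PySem.List.pyRange 0 10 1).foldl (fun acc2 x =>
          acc2.insert (p.1.1 + x, p.1.2 + x * x) (acc2.getD (p.1.1 + x, p.1.2 + x * x) 0 + p.2))
          d) = D at g1 g2 ⊢
    obtain ⟨h1, h2⟩ := ih D g1
    refine ⟨h1, fun w => ?_⟩
    rw [h2 w, g2 w, List.sum_map_mul_right]
    simp only [List.map_cons, List.sum_cons, shiftW]
    ring
def keyN (j : Nat) : Int × Int := ((dsN j : Int), (dqN j : Int))

theorem pyRange10 : PySem.List.pyRange 0 10 1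
    = (List.range 10).map (fun (k : Nat) => (k : Int)) := by
  have := PySem.List.pyRange_zero_natCast 10
  simpa using this

theorem shiftW_keyN (w : Int × Int → Int) (j : Nat) :
    shiftW w (keyN j) = ((List.range 10).map (fun x => w (keyN (10 * j + x)))).sum := by
  rw [shiftW, pyRange10, List.map_map]
  congr 1
  apply List.map_congr_left
  intro x hx
  have hx' := List.mem_range.mp hx
  simp only [Function.comp, keyN]
  rw [dsN_step j x hx', dqN_step j x hx']
  push_cast
  ring_nf

theorem sum_regroup (f : Nat → Int) (V : Nat) :
    ((List.range (10 * V)).map f).sum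
      = ((List.range V).map (fun j => ((List.range 10).map (fun x => f (10 * j + x))).sum)).sum := by
  induction V with
  | zero => simp
  | succ V ih =>
    rw [show 10 * (V + 1) = 10 * V + 10 by ring, List.range_add, List.map_append,
      List.sum_append, ih]
    have h2 : List.range (V + 1) = List.range V ++ [V] := List.range_succ
    rw [h2, List.map_append, List.sum_append, List.map_map]
    simp [Function.comp_def]

def InvP (st : PySem.Dict (Int × Int) Int × Int × Int) (V : Nat) : Prop :=
  st.1.keys.Nodup
  ∧ (∀ w, Wsum st.1 w = ((List.range V).map (fun j => w (keyN j))).sum)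
  ∧ st.2.1 = (dsN V : Int) ∧ st.2.2 = (dqN V : Int)

theorem dpStep_inv (st : PySem.Dict (Int × Int) Int × Int × Int) (V : Nat)
    (h : InvP st V) (dn : Nat) (hdn : dn < 10) :
    InvP (dpStep st (dn : Int)) (10 * V + dn) := by
  obtain ⟨hnd, hw, hS, hQ⟩ := h
  obtain ⟨g1, g2⟩ := wsum_outer st.1.items PySem.Dict.empty PySem.Dict.nodup_keys_empty
  obtain ⟨t1, t2⟩ := wsum_foldl_bump (PySem.List.pyRange 0 (dn : Int) 1)
    (fun x => (st.2.1 + x, st.2.2 + x * x)) (fun _ => 1)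
    _ g1
  simp only [dpStep, InvP]
  refine ⟨t1, ?_, ?_, ?_⟩
  · intro w
    rw [t2 w, g2 w]
    have hempty : Wsum PySem.Dict.empty w = 0 := rfl
    have houter : (st.1.items.map (fun p => shiftW w p.1 * p.2)).sum = Wsum st.1 (shiftW w) := rfl
    rw [hempty, houter, hw (shiftW w), zero_add]
    -- tight part: pyRange 0 dn as Nat range
    have hrange : PySem.List.pyRange 0 (dn : Int) 1
        = (List.range dn).map (fun (k : Nat) => (k : Int)) := by
      have := PySem.List.pyRange_zero_natCast dn
      simpa using this
    rw [hrange, List.map_map]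
    have htight : ∀ x ∈ List.range dn,
        ((fun x => w (st.2.1 + x, st.2.2 + x * x) * 1) ∘ (fun (k : Nat) => (k : Int))) x
          = w (keyN (10 * V + x)) := by
      intro x hx
      have hx' := List.mem_range.mp hx
      simp only [Function.comp, keyN, hS, hQ, mul_one]
      rw [dsN_step V x (by omega), dqN_step V x (by omega)]
      push_cast
      ring_nf
    rw [List.map_congr_left htight]
    -- spread part: regroup
    have hspread : ∀ j ∈ List.range V,
        (fun j => shiftW w (keyN j)) j
          = ((List.range 10).map (fun x => w (keyN (10 * j + x)))).sum := by
      intro j _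
      exact shiftW_keyN w j
    rw [List.map_congr_left hspread, ← sum_regroup (fun j => w (keyN j)) V]
    rw [List.range_add, List.map_append, List.sum_append, List.map_map]
    rfl
  · simp only [hS]
    rw [dsN_step V dn hdn]
    push_cast
    ring
  · simp only [hQ]
    rw [dqN_step V dn hdn]
    push_cast
    ring

theorem dp_fold (l : List Nat) : ∀ (st : PySem.Dict (Int × Int) Int × Int × Int) (V : Nat),
    (∀ d ∈ l, d < 10) → InvP st V →
    InvP ((l.map (fun (d : Nat) => (d : Int))).foldl dpStep st) (l.foldl (fun v d => 10 * v + d) V) := by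
  induction l with
  | nil => intro st V _ h; simpa using h
  | cons d t ih =>
    intro st V hlt h
    simp only [List.map_cons, List.foldl_cons]
    exact ih (dpStep st (d : Int)) (10 * V + d)
      (fun x hx => hlt x (List.mem_cons_of_mem d hx))
      (dpStep_inv st V h d (hlt d List.mem_cons_self))
theorem countUpto_natCast (m : Nat) : countUpto (m : Int) = G (m + 1) := by
  have hneg : ¬ ((m : Int) < 0) := by omega
  simp only [countUpto, hneg, if_false]
  rw [pyDigits_natCast m]
  have hInv0 : InvP (PySem.Dict.empty, 0, 0) 0 := by
    refine ⟨PySem.Dict.nodup_keys_empty, fun w => rfl, by simp [dsN_zero], by simp [dqN_zero]⟩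
  have h := dp_fold (digN m) (PySem.Dict.empty, 0, 0) 0 (digN_lt m) hInv0
  rw [digN_val m] at h
  generalize hst : ((digN m).map (fun (d : Nat) => (d : Int))).foldl dpStep
      (PySem.Dict.empty, 0, 0) = st at h ⊢
  obtain ⟨hnd, hw, hS, hQ⟩ := h
  have hcong : ∀ (acc : Int), ∀ p ∈ st.1.items,
      (if isPrime p.1.1 && isPrime p.1.2 then acc + p.2 else acc)
        = acc + (if isPrime p.1.1 && isPrime p.1.2 then p.2 else 0) := by
    intro acc p _
    split_ifs <;> simp
  rw [PySem.List.foldl_congr_mem st.1.items _ _ 0 hcong, PySem.List.foldl_add]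
  have hmap : ∀ p ∈ st.1.items,
      (if isPrime p.1.1 && isPrime p.1.2 then p.2 else 0)
        = (fun k : Int × Int => if isPrime k.1 && isPrime k.2 then (1:Int) else 0) p.1 * p.2 := by
    intro p _
    cases h : (isPrime p.1.1 && isPrime p.1.2) <;> simp [h]
  rw [List.map_congr_left hmap]
  have hWP := hw (fun k : Int × Int => if isPrime k.1 && isPrime k.2 then (1:Int) else 0)
  rw [Wsum] at hWP
  rw [hWP]
  have hind : ((List.range m).map (fun j =>
      (fun k : Int × Int => if isPrime k.1 && isPrime k.2 then (1:Int) else 0) (keyN j))).sum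
      = G m := by
    unfold G
    congr 1
  rw [hind, hS, hQ]
  have hGsucc : G (m + 1) = G m + indN m := by
    unfold G
    rw [List.range_succ, List.map_append, List.sum_append]
    simp
  rw [hGsucc]
  show (if chkB m then 0 + G m + 1 else 0 + G m) = G m + indN m
  unfold indN
  split_ifs <;> ring

theorem countUpto_neg_one : countUpto (-1) = 0 := by
  norm_num [countUpto]

theorem countB_eq (L R : Int) (h0 : 0 ≤ L) (hLR : L ≤ R) :
    countnumber_alt L R = G (R.toNat + 1) - G L.toNat := by
  rw [countnumber_alt, if_neg (by omega)]
  have hR : ((R.toNat : Nat) : Int) = R := by omega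
  have hcuR : countUpto R = G (R.toNat + 1) := by
    conv_lhs => rw [← hR]
    exact countUpto_natCast R.toNat
  by_cases hL0 : L = 0
  · subst hL0
    rw [show (0:Int) - 1 = -1 by ring, countUpto_neg_one, hcuR]
    have hG0 : G ((0:Int).toNat) = 0 := rfl
    rw [hG0]
  · have hL : ((L.toNat - 1 : Nat) : Int) = L - 1 := by omega
    have h1 : L.toNat - 1 + 1 = L.toNat := by omega
    have hcuL : countUpto (L - 1) = G L.toNat := by
      conv_lhs => rw [← hL]
      rw [countUpto_natCast, h1]
    rw [hcuR, hcuL]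

theorem main_eq (L R : Int) (hPre : Pre_countnumber L R) :
    countnumber L R = (if L = 0 ∧ 0 ≤ R then 1 else 0) + countnumber_alt L R := by
  have hempty : ∀ (hRL : R < L), countnumber L R = 0 := by
    intro hRL
    simp only [countnumber]
    rw [PySem.List.pyRange_one_eq_nil (by omega)]
    rfl
  have hBempty : ∀ (hRL : R < L), countnumber_alt L R = 0 := by
    intro hRL
    rw [countnumber_alt, if_pos (show L > R by omega)]
  rcases hPre with hRL | ⟨hL, hR⟩
  · rw [hempty hRL, hBempty hRL, if_neg (show ¬ (L = 0 ∧ 0 ≤ R) by omega)]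
    ring
  · by_cases hRL : R < L
    · rw [hempty hRL, hBempty hRL, if_neg (show ¬ (L = 0 ∧ 0 ≤ R) by omega)]
      ring
    · have hLR : L ≤ R := by omega
      have hLa : ((L.toNat : Nat) : Int) = L := by omega
      have hRb : ((R.toNat : Nat) : Int) = R := by omega
      rw [countB_eq L R hL hLR, ← hLa, ← hRb,
        countA_eq L.toNat R.toNat (by omega) (by omega)]
      by_cases hL0 : L.toNat = 0
      · rw [if_pos hL0, if_pos (by omega)]
        rw [Int.toNat_natCast, Int.toNat_natCast]
      · rw [if_neg hL0, if_neg (by omega)]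
        rw [Int.toNat_natCast, Int.toNat_natCast]

-- ===== VERDICT (by name: the statement is the Claim_ definition above) =====
theorem countnumber_spec : Claim_unchanged_countnumber := by
  intro L R _ hPre
  unfold Spec_countnumber
  intro hD
  have h := main_eq L R hPre
  have hnD : ¬ (L = 0 ∧ 0 ≤ R) := by unfold D_countnumber at hD; exact hD
  rw [h, if_neg hnD]; ring

set_option maxRecDepth 100000 in
set_option maxHeartbeats 4000000 in
theorem countnumber_changed : Claim_changed_countnumber := by
  unfold Claim_changed_countnumber; decide

theorem countnumber_tight : Claim_exact_countnumber := by
  intro L R _ hPre hD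
  have h := main_eq L R hPre
  unfold D_countnumber at hD
  rw [h, if_pos hD]
  omega
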